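-- pv_equiv track=rewrite | github.com/Spatch7/ForeFlightCodeChallenge | app/main.py | summerize_cloud_text
-- ===== SOURCE A (Python) =====
-- def summerize_cloud_text(cloud_data):
--     cloud_layers = cloud_data.split(" ")
--     cloud_coverage = []
--     for layer in cloud_layers:
--         if layer.startswith("FEW") or layer.startswith("SCT") or layer.startswith("BKN") or layer.startswith("OVC"):
--             coverage = layer[:3]
--             cloud_coverage.append(coverage)
--     if cloud_coverage:
--         return max(cloud_coverage)
--     else:
--         return None
-- ===== SOURCE B (Python) =====
-- def summerize_cloud_text(cloud_data):
--     tokens = cloud_data.split(" ")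
--     for code in ("SCT", "OVC", "FEW", "BKN"):
--         if any(tok.startswith(code) for tok in tokens):
--             return code
--     return None
-- ===== Notes on version B (the rewrite author's own statement) =====
-- stated objective: simpler
-- what changed: Instead of collecting every matching 3-letter prefix into a list and taking its lexicographic max, B scans the four candidate codes in descending lexicographic order (SCT, OVC, FEW, BKN) and returns the first one some token starts with.
import Mathlib
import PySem

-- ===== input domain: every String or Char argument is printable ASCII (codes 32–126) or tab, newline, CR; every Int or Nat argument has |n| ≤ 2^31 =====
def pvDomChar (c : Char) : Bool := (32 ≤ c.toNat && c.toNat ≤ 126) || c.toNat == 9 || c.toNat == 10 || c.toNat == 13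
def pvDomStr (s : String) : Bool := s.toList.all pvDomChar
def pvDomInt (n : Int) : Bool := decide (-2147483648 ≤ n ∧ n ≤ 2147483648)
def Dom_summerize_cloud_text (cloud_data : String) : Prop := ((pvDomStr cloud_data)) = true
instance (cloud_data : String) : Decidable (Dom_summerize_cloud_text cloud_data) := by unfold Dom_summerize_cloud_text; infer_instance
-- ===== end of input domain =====

-- B replaces A's collect-all-prefixes-then-lexicographic-max pass by a priority scan over the
-- four candidate codes in descending lexicographic order; same return value, similar cost.

-- ===== PORT A =====
-- split? is none only for an empty separator; the separator is the literal " ", so .getD [] never fires.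
def summerize_cloud_text (cloud_data : String) : Option String :=
  let cloud_layers := (PySem.Str.split? cloud_data " ").getD []
  let cloud_coverage := cloud_layers.foldl (fun acc layer =>
    if PySem.Str.startswith layer "FEW" || PySem.Str.startswith layer "SCT" ||
       PySem.Str.startswith layer "BKN" || PySem.Str.startswith layer "OVC" then
      acc ++ [PySem.Str.slice layer none (some 3)]
    else acc) []
  match cloud_coverage with
  | [] => none
  | _ => PySem.List.max? cloud_coverage (fun x => x)

-- ===== PORT B =====
def summerize_cloud_text_alt (cloud_data : String) : Option String :=
  let tokens := (PySem.Str.split? cloud_data " ").getD []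
  ["SCT", "OVC", "FEW", "BKN"].find? (fun code => tokens.any (fun tok => PySem.Str.startswith tok code))

-- ===== PRECONDITION & SPEC =====
def Spec_summerize_cloud_text (cloud_data : String) (out : Option String) : Prop := out = summerize_cloud_text_alt cloud_data
instance (cloud_data : String) (out : Option String) : Decidable (Spec_summerize_cloud_text cloud_data out) := by unfold Spec_summerize_cloud_text; infer_instance

-- ===== CLAIM (what is proved, stated in full; the proofs are below) =====
def Claim_equal_summerize_cloud_text : Prop := ∀ (cloud_data : String), Dom_summerize_cloud_text cloud_data → Spec_summerize_cloud_text cloud_data (summerize_cloud_text cloud_data)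

-- ===== LEMMAS AND PROOFS =====

-- the four codes, and A's filter condition / prefix extraction, named for the proofs
def pvCodes : List String := ["FEW", "SCT", "BKN", "OVC"]
def pvCond (layer : String) : Bool :=
  PySem.Str.startswith layer "FEW" || PySem.Str.startswith layer "SCT" ||
  PySem.Str.startswith layer "BKN" || PySem.Str.startswith layer "OVC"
def pvSlice3 (layer : String) : String := PySem.Str.slice layer none (some 3)

-- a token starting with a 3-char code has exactly that code as its first three characters
theorem pvSlice3_eq {t c : String} (hc : c.toList.length = 3)
    (h : PySem.Str.startswith t c = true) : pvSlice3 t = c := by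
  have hpre : c.toList <+: t.toList := (PySem.Chars.startswith_iff _ _).mp (by simpa using h)
  have hl : (pvSlice3 t).toList = c.toList := by
    rw [pvSlice3, PySem.Str.toList_slice]
    simp only [PySem.Chars.slice_eq_listSlice]
    rw [PySem.List.slice_to t.toList (b := 3) (by norm_num)]
    obtain ⟨r, hr⟩ := hpre
    rw [← hr]
    show List.take (Int.toNat 3) (c.toList ++ r) = c.toList
    rw [show Int.toNat 3 = 3 from rfl, ← hc, List.take_left]
  exact String.toList_inj.mp hl

-- unpack A's filter condition into the four prefix cases
theorem pvCond_cases {t : String} (h : pvCond t = true) :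
    PySem.Str.startswith t "FEW" = true ∨ PySem.Str.startswith t "SCT" = true ∨
    PySem.Str.startswith t "BKN" = true ∨ PySem.Str.startswith t "OVC" = true := by
  simpa [pvCond, Bool.or_eq_true, or_assoc] using h

-- a code is collected by A iff some token starts with it
theorem pvMem_cov (ts : List String) (c : String) (hc : c ∈ pvCodes) :
    (c ∈ (ts.filter pvCond).map pvSlice3) ↔ (ts.any (fun tok => PySem.Str.startswith tok c) = true) := by
  constructor
  · intro hm
    obtain ⟨t, ht, hst⟩ := List.mem_map.mp hm
    obtain ⟨ht', hcond⟩ := List.mem_filter.mp ht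
    rw [List.any_eq_true]
    refine ⟨t, ht', ?_⟩
    rcases pvCond_cases hcond with h | h | h | h <;>
      · have he := pvSlice3_eq (by decide) h
        rw [hst] at he
        rw [he]
        exact h
  · intro ha
    obtain ⟨t, ht, hst⟩ := List.any_eq_true.mp ha
    apply List.mem_map.mpr
    refine ⟨t, List.mem_filter.mpr ⟨ht, ?_⟩, pvSlice3_eq ?_ hst⟩
    · fin_cases hc <;> simp only [pvCond, hst, Bool.true_or, Bool.or_true]
    · fin_cases hc <;> decide
-- everything A collects is one of the four codes
theorem pvCov_sub (ts : List String) : ∀ x ∈ (ts.filter pvCond).map pvSlice3, x ∈ pvCodes := by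
  intro x hx
  obtain ⟨t, ht, hst⟩ := List.mem_map.mp hx
  have hcond := (List.mem_filter.mp ht).2
  rcases pvCond_cases hcond with h | h | h | h <;>
    rw [← hst, pvSlice3_eq (by decide) h] <;> decide

-- max? of a list is the element that bounds it
theorem pvMax_eq {L : List String} {c : String} (hmem : c ∈ L) (hall : ∀ x ∈ L, x ≤ c) :
    PySem.List.max? L (fun x => x) = some c := by
  cases h : PySem.List.max? L (fun x => x) with
  | none => exact absurd ((PySem.List.max?_eq_none_iff L _).mp h ▸ hmem) (List.not_mem_nil)
  | some m =>
    have h1 : m ≤ c := hall m (PySem.List.max?_mem h)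
    have h2 : c ≤ m := PySem.List.max?_isMax h c hmem
    exact congrArg some (le_antisymm h1 h2)

-- the lexicographic max of a nonempty list over the codes is the first present code in descending order
theorem pvMax_char (L : List String) (hne : L ≠ []) (hL : ∀ x ∈ L, x ∈ pvCodes) :
    PySem.List.max? L (fun x => x) =
      ["SCT", "OVC", "FEW", "BKN"].find? (fun c => decide (c ∈ L)) := by
  by_cases hS : "SCT" ∈ L
  · rw [pvMax_eq hS ?_]
    · simp [List.find?, hS]
    · intro x hx
      have hx4 := hL x hx
      fin_cases hx4 <;>
        first
        | exact le_refl _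
        | exact le_of_lt (by rw [String.lt_iff_toList_lt]; decide)
  · by_cases hO : "OVC" ∈ L
    · rw [pvMax_eq hO ?_]
      · simp [List.find?, hS, hO]
      · intro x hx
        have hx4 := hL x hx
        have hxS : x ≠ "SCT" := fun e => hS (e ▸ hx)
        fin_cases hx4 <;>
          first
          | exact absurd rfl hxS
          | exact le_refl _
          | exact le_of_lt (by rw [String.lt_iff_toList_lt]; decide)
    · by_cases hF : "FEW" ∈ L
      · rw [pvMax_eq hF ?_]
        · simp [List.find?, hS, hO, hF]
        · intro x hx
          have hx4 := hL x hx
          have hxS : x ≠ "SCT" := fun e => hS (e ▸ hx)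
          have hxO : x ≠ "OVC" := fun e => hO (e ▸ hx)
          fin_cases hx4 <;>
            first
            | exact absurd rfl hxS
            | exact absurd rfl hxO
            | exact le_refl _
            | exact le_of_lt (by rw [String.lt_iff_toList_lt]; decide)
      · by_cases hB : "BKN" ∈ L
        · rw [pvMax_eq hB ?_]
          · simp [List.find?, hS, hO, hF, hB]
          · intro x hx
            have hx4 := hL x hx
            have hxS : x ≠ "SCT" := fun e => hS (e ▸ hx)
            have hxO : x ≠ "OVC" := fun e => hO (e ▸ hx)
            have hxF : x ≠ "FEW" := fun e => hF (e ▸ hx)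
            fin_cases hx4 <;>
              first
              | exact absurd rfl hxS
              | exact absurd rfl hxO
              | exact absurd rfl hxF
              | exact le_refl _
        · exfalso
          apply hne
          cases L with
          | nil => rfl
          | cons y t =>
            have hy4 := hL y List.mem_cons_self
            fin_cases hy4
            · exact absurd List.mem_cons_self hF
            · exact absurd List.mem_cons_self hS
            · exact absurd List.mem_cons_self hB
            · exact absurd List.mem_cons_self hO

-- ===== VERDICT (by name: the statement is the Claim_ definition above) =====
theorem summerize_cloud_text_spec : Claim_equal_summerize_cloud_text := by
  intro cloud_data _
  unfold Spec_summerize_cloud_text summerize_cloud_text summerize_cloud_text_alt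
  generalize (PySem.Str.split? cloud_data " ").getD [] = ts
  dsimp only
  rw [show (fun (acc : List String) layer =>
        if PySem.Str.startswith layer "FEW" || PySem.Str.startswith layer "SCT" ||
           PySem.Str.startswith layer "BKN" || PySem.Str.startswith layer "OVC" then
          acc ++ [PySem.Str.slice layer none (some 3)]
        else acc) = (fun acc layer => if pvCond layer then acc ++ [pvSlice3 layer] else acc) from rfl,
      PySem.List.foldl_append_if pvCond pvSlice3 ts [], List.nil_append]
  cases hcov : (ts.filter pvCond).map pvSlice3 with
  | nil =>
    have h : ∀ c ∈ pvCodes, ts.any (fun tok => PySem.Str.startswith tok c) = false := by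
      intro c hc
      rw [← Bool.not_eq_true, ← pvMem_cov ts c hc, hcov]
      simp
    simp only [List.find?, h "SCT" (by decide), h "OVC" (by decide),
               h "FEW" (by decide), h "BKN" (by decide)]
  | cons x rest =>
    rw [pvMax_char (x :: rest) (by simp) (by rw [← hcov]; exact pvCov_sub ts)]
    have h : ∀ c ∈ pvCodes,
        (decide (c ∈ x :: rest)) = ts.any (fun tok => PySem.Str.startswith tok c) := by
      intro c hc
      rw [Bool.eq_iff_iff]
      simp only [decide_eq_true_eq]
      rw [← hcov]
      exact pvMem_cov ts c hc
    simp only [List.find?, h "SCT" (by decide), h "OVC" (by decide),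
               h "FEW" (by decide), h "BKN" (by decide)]
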